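-- pv_equiv track=rewrite | github.com/caitlinturnidge/Advent_of_code_2023 | day8/day8.py | get_next_value
-- ===== SOURCE A (Python) =====
-- def get_elements_dict(maps):
--     """Create an element dict, with its left and right values."""
--     elements = []
--     for row in maps:
--         elements.append({'element': f'{row[:3]}',
--                          'left': f'{row[7:10]}',
--                          'right': f'{row[12:15]}'})
--     return elements
--
-- def get_next_value(maps, element, rule) -> list[dict]:
--     """Get the next value in the sequence, given and element and a rule."""
--     elements = get_elements_dict(maps)
--     for char in elements:
--         if char['element'] == element:
--             if rule == 'L':
--                 return char['left']
--             if rule == 'R':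
--                 return char['right']
-- ===== SOURCE B (Python) =====
-- def get_next_value(maps, element, rule):
--     """Get the next value in the sequence, given an element and a rule."""
--     if rule == 'L':
--         lo, hi = 7, 10
--     elif rule == 'R':
--         lo, hi = 12, 15
--     else:
--         return None
--     for row in maps:
--         if row[:3] == element:
--             return row[lo:hi]
--     return None
-- ===== Notes on version B (the rewrite author's own statement) =====
-- stated objective: simpler
-- what changed: Dispatch on the rule once up front to pick the slice bounds, then a single scan over the raw rows; no intermediate list of dicts is built.
import Mathlib
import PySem

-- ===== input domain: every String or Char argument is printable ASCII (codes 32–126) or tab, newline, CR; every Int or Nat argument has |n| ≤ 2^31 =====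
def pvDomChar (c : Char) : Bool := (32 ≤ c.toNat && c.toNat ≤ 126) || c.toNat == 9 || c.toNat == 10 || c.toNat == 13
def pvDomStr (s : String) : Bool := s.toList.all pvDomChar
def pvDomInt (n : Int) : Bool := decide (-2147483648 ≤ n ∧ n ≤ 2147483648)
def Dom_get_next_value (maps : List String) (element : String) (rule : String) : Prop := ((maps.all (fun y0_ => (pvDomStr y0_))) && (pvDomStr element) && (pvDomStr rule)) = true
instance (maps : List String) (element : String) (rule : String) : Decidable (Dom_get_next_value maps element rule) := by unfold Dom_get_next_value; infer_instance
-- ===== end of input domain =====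

-- B drops the intermediate list of dicts: it dispatches on the rule once, then scans the raw rows (objective: simpler).

-- ===== PORT A =====
-- helper: one row's dict {'element': row[:3], 'left': row[7:10], 'right': row[12:15]}
def rowDict (row : String) : PySem.Dict String String :=
  ((PySem.Dict.empty.insert "element" (PySem.Str.slice row none (some 3))).insert
      "left" (PySem.Str.slice row (some 7) (some 10))).insert
      "right" (PySem.Str.slice row (some 12) (some 15))

def get_elements_dict (maps : List String) : List (PySem.Dict String String) :=
  maps.foldl (fun elements row => elements ++ [rowDict row]) []

-- the for-loop of get_next_value; char['element'] etc. always succeed (keys built above), ported as getD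
def aLoop (elements : List (PySem.Dict String String)) (element : String) (rule : String) : Option String :=
  match elements with
  | [] => none
  | ch :: rest =>
      if ch.getD "element" "" == element then
        if rule == "L" then some (ch.getD "left" "")
        else if rule == "R" then some (ch.getD "right" "")
        else aLoop rest element rule
      else aLoop rest element rule

def get_next_value (maps : List String) (element : String) (rule : String) : Option String :=
  aLoop (get_elements_dict maps) element rule

-- ===== PORT B =====
def bScan (maps : List String) (element : String) (lo hi : Int) : Option String :=
  match maps with
  | [] => none
  | row :: rest =>
      if PySem.Str.slice row none (some 3) == element then
        some (PySem.Str.slice row (some lo) (some hi))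
      else bScan rest element lo hi

def get_next_value_alt (maps : List String) (element : String) (rule : String) : Option String :=
  if rule == "L" then bScan maps element 7 10
  else if rule == "R" then bScan maps element 12 15
  else none

-- ===== PRECONDITION & SPEC =====
def Spec_get_next_value (maps : List String) (element : String) (rule : String) (out : Option String) : Prop := out = get_next_value_alt maps element rule
instance (maps : List String) (element : String) (rule : String) (out : Option String) : Decidable (Spec_get_next_value maps element rule out) := by unfold Spec_get_next_value; infer_instance

-- ===== CLAIM (what is proved, stated in full; the proofs are below) =====
def Claim_equal_get_next_value : Prop := ∀ (maps : List String) (element : String) (rule : String), Dom_get_next_value maps element rule → Spec_get_next_value maps element rule (get_next_value maps element rule)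

-- ===== LEMMAS AND PROOFS =====
theorem get_elements_dict_cons (row : String) (rest : List String) :
    get_elements_dict (row :: rest) = rowDict row :: get_elements_dict rest := by
  simp [get_elements_dict, List.foldl_cons]

theorem rowDict_getD_element (row : String) :
    (rowDict row).getD "element" "" = PySem.Str.slice row none (some 3) := by
  simp [rowDict, PySem.Dict.getD, PySem.Dict.get?, PySem.Dict.insert, PySem.Dict.empty, PySem.Dict.contains]

theorem rowDict_getD_left (row : String) :
    (rowDict row).getD "left" "" = PySem.Str.slice row (some 7) (some 10) := by
  simp [rowDict, PySem.Dict.getD, PySem.Dict.get?, PySem.Dict.insert, PySem.Dict.empty, PySem.Dict.contains]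

theorem rowDict_getD_right (row : String) :
    (rowDict row).getD "right" "" = PySem.Str.slice row (some 12) (some 15) := by
  simp [rowDict, PySem.Dict.getD, PySem.Dict.get?, PySem.Dict.insert, PySem.Dict.empty, PySem.Dict.contains]

theorem aLoop_L (maps : List String) (element : String) :
    aLoop (get_elements_dict maps) element "L" = bScan maps element 7 10 := by
  induction maps with
  | nil => simp [get_elements_dict, aLoop, bScan]
  | cons row rest ih =>
      rw [get_elements_dict_cons]
      simp only [aLoop, bScan, rowDict_getD_element, rowDict_getD_left]
      split_ifs <;> simp_all

theorem aLoop_R (maps : List String) (element : String) :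
    aLoop (get_elements_dict maps) element "R" = bScan maps element 12 15 := by
  induction maps with
  | nil => simp [get_elements_dict, aLoop, bScan]
  | cons row rest ih =>
      rw [get_elements_dict_cons]
      simp only [aLoop, bScan, rowDict_getD_element, rowDict_getD_right]
      split_ifs <;> simp_all

theorem aLoop_other (maps : List String) (element : String) (rule : String)
    (hl : rule ≠ "L") (hr : rule ≠ "R") :
    aLoop (get_elements_dict maps) element rule = none := by
  induction maps with
  | nil => simp [get_elements_dict, aLoop]
  | cons row rest ih =>
      rw [get_elements_dict_cons]
      simp only [aLoop]
      split_ifs <;> simp_all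

theorem main_eq (maps : List String) (element : String) (rule : String) :
    get_next_value maps element rule = get_next_value_alt maps element rule := by
  unfold get_next_value get_next_value_alt
  by_cases hl : rule = "L"
  · subst hl; simp [aLoop_L]
  · by_cases hr : rule = "R"
    · subst hr; simp [aLoop_R]
    · simp [hl, hr, aLoop_other maps element rule hl hr]

-- ===== VERDICT (by name: the statement is the Claim_ definition above) =====
theorem get_next_value_spec : Claim_equal_get_next_value := by
  intro maps element rule _
  unfold Spec_get_next_value
  exact main_eq maps element rule
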